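-- pv_equiv track=rewrite | github.com/KrapivinAndrey/AliceDiaryNew | diary/skill/gr.py | parseGrammar
-- ===== SOURCE A (Python) =====
-- def parseGrammar(data):
--     result = []
--     for i in range(len(data)):
--         if data[i].find("root") > -1:
--             root = data[i + 1].split()
--             data.pop(i + 1)
--             break
--
--     for word in root:
--         for i in range(len(data)):
--             if data[i].find(word) > -1:
--                 word_list = [x.strip() for x in data[i + 2].split("|")]
--                 result.append(word_list)
--                 break
--     return result
-- ===== SOURCE B (Python) =====
-- def parseGrammar(data):
--     # Same first phase as A (including the pop mutation of data).
--     for i in range(len(data)):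
--         if "root" in data[i]:
--             root = data[i + 1].split()
--             data.pop(i + 1)
--             break
--
--     # One pass over the lines: record, for each root word, the index of the
--     # first line containing it (first wins).
--     index = {}
--     for j, line in enumerate(data):
--         for w in root:
--             if w not in index and w in line:
--                 index[w] = j
--
--     # Output pass, in root-word order.
--     result = []
--     for w in root:
--         if w in index:
--             result.append([x.strip() for x in data[index[w] + 2].split("|")])
--     return result
-- ===== Notes on version B (the rewrite author's own statement) =====
-- stated objective: alternative
-- what changed: A rescans the whole data list from the start for every root word; B makes a single pass over the lines building a word->first-matching-line-index dict (first wins) and then emits the results in root-word order by dict lookup.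
import Mathlib
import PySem

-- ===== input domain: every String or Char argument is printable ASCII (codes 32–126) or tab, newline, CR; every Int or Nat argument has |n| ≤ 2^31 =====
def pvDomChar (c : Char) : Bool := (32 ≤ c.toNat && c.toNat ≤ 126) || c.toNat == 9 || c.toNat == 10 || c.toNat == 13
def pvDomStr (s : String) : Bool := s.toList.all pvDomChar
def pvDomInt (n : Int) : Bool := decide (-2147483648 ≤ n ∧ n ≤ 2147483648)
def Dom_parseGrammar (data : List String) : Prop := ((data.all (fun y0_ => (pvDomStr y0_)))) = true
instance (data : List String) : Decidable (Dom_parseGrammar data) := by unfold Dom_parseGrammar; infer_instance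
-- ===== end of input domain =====

-- B replaces A's per-root-word rescans of the data by a single build-an-index pass
-- (word -> first matching line index, first wins) followed by an output pass
-- (objective: alternative decomposition; both Pythons pop data[i+1] in place — return value only is compared).

-- ===== PORT A =====
-- [x.strip() for x in line.split("|")]  (shared by both Pythons verbatim)
def pvStripSplit (line : String) : List String :=
  match PySem.Str.split? line "|" with      -- "|" ≠ "": split? is always `some` here
  | some parts => parts.map PySem.Str.strip
  | none => []

-- A's linear scan with break: first index i with data[i].find(word) > -1
def pvScan (word : String) : List String → Option Nat
  | [] => none
  | s :: rest => if PySem.Str.find s word > -1 then some 0 else (pvScan word rest).map (· + 1)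

-- A's second loop: for word in root, scan, append (Python raises IndexError where pyGet? is none; excluded by Pre_)
def pvALoop (data' : List String) : List String → List (List String) → List (List String)
  | [], result => result
  | word :: rest, result =>
    match pvScan word data' with
    | none => pvALoop data' rest result
    | some j =>
      match PySem.List.pyGet? data' ((j : Int) + 2) with
      | none => pvALoop data' rest result
      | some line => pvALoop data' rest (result ++ [pvStripSplit line])

def parseGrammar (data : List String) : List (List String) :=
  match pvScan "root" data with
  | none => []   -- Python: NameError (root unbound); excluded by Pre_
  | some i =>
    match PySem.List.pop? data ((i : Int) + 1) with
    | none => []   -- Python: IndexError on data[i+1]; excluded by Pre_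
    | some (nextLine, popped) => pvALoop popped (PySem.Str.split₀ nextLine) []

-- ===== PORT B =====
-- B's first phase: first index i with "root" in data[i]
def pvFindRootB : List String → Option Nat
  | [] => none
  | s :: rest => if PySem.Str.isIn "root" s then some 0 else (pvFindRootB rest).map (· + 1)

-- inner loop of the index-building pass: for w in root: if w not in index and w in line: index[w] = j
def pvRecord (line : String) (j : Int) (root : List String) (d : PySem.Dict String Int) :
    PySem.Dict String Int :=
  root.foldl (fun d w => if !d.contains w && PySem.Str.isIn w line then d.insert w j else d) d

-- for j, line in enumerate(data): …
def pvBuildIndex (root : List String) : List String → Int → PySem.Dict String Int → PySem.Dict String Int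
  | [], _, d => d
  | line :: rest, j, d => pvBuildIndex root rest (j + 1) (pvRecord line j root d)

-- output pass, in root-word order
def pvBOut (data' : List String) (idx : PySem.Dict String Int) : List String → List (List String)
  | [] => []
  | w :: rest =>
    match idx.get? w with
    | none => pvBOut data' idx rest
    | some j =>
      match PySem.List.pyGet? data' (j + 2) with
      | none => pvBOut data' idx rest
      | some line => pvStripSplit line :: pvBOut data' idx rest

def parseGrammar_alt (data : List String) : List (List String) :=
  match pvFindRootB data with
  | none => []
  | some i =>
    match PySem.List.pop? data ((i : Int) + 1) with
    | none => []
    | some (nextLine, popped) =>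
      let root := PySem.Str.split₀ nextLine
      pvBOut popped (pvBuildIndex root popped 0 PySem.Dict.empty) root

-- ===== PRECONDITION & SPEC =====
-- Pre_ excludes exactly the inputs on which Python A raises: no line containing "root" (NameError),
-- the first such line is the last line (IndexError on data[i+1]), or some root word first matches a
-- line whose index+2 is past the end of the popped list (IndexError on data[i+2]).
def Pre_parseGrammar (data : List String) : Prop :=
  data.any (fun s => PySem.Str.isIn "root" s) = true ∧
  data.findIdx (fun s => PySem.Str.isIn "root" s) + 1 < data.length ∧
  (∀ w ∈ PySem.Str.split₀ (data.getD (data.findIdx (fun s => PySem.Str.isIn "root" s) + 1) ""),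
    (data.eraseIdx (data.findIdx (fun s => PySem.Str.isIn "root" s) + 1)).any
        (fun s => PySem.Str.isIn w s) = true →
      (data.eraseIdx (data.findIdx (fun s => PySem.Str.isIn "root" s) + 1)).findIdx
          (fun s => PySem.Str.isIn w s) + 2
        < (data.eraseIdx (data.findIdx (fun s => PySem.Str.isIn "root" s) + 1)).length)
instance (data : List String) : Decidable (Pre_parseGrammar data) := by
  unfold Pre_parseGrammar; infer_instance

def pvWitness_parseGrammar : List String := ["root", "a", "a-rule", "ignored", "x | y"]

def Spec_parseGrammar (data : List String) (out : List (List String)) : Prop := out = parseGrammar_alt data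
instance (data : List String) (out : List (List String)) : Decidable (Spec_parseGrammar data out) := by unfold Spec_parseGrammar; infer_instance

-- ===== CLAIM (what is proved, stated in full; the proofs are below) =====
def Claim_equal_parseGrammar : Prop := ∀ (data : List String), Dom_parseGrammar data → Pre_parseGrammar data → Spec_parseGrammar data (parseGrammar data)

-- ===== LEMMAS AND PROOFS =====

-- the two Pythons' membership tests agree: line.find(w) > -1  ↔  w in line
theorem pvCondIff (s w : String) : PySem.Str.find s w > -1 ↔ PySem.Str.isIn w s = true := by
  have h0 : PySem.Str.find s w > -1 ↔ 0 ≤ PySem.Str.find s w := by omega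
  rw [h0, PySem.Str.find_nonneg_iff, PySem.Str.isIn_iff_infix]

theorem pvFindRootB_eq (xs : List String) : pvFindRootB xs = pvScan "root" xs := by
  induction xs with
  | nil => rfl
  | cons x rest ih =>
    simp only [pvFindRootB, pvScan, ih]
    by_cases h : PySem.Str.isIn "root" x = true
    · rw [if_pos h, if_pos ((pvCondIff x "root").mpr h)]
    · rw [if_neg h, if_neg (fun hc => h ((pvCondIff x "root").mp hc))]

theorem pvRecord_get? (line : String) (j : Int) (root : List String) (d : PySem.Dict String Int)
    (w : String) :
    (pvRecord line j root d).get? w =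
      if w ∈ root ∧ d.contains w = false ∧ PySem.Str.isIn w line = true then some j
      else d.get? w := by
  induction root generalizing d with
  | nil => simp [pvRecord]
  | cons r rest ih =>
    show (pvRecord line j rest
        (if !d.contains r && PySem.Str.isIn r line then d.insert r j else d)).get? w = _
    rw [ih]
    by_cases hcr : d.contains r = true
    · have hC : (!d.contains r && PySem.Str.isIn r line) = false := by simp [hcr]
      rw [hC]
      by_cases hw : w = r
      · subst hw; simp [hcr]
      · simp [hw]
    · have hcr' : d.contains r = false := by simpa using hcr
      by_cases hir : PySem.Chars.isIn r.toList line.toList = true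
      · have hC : (!d.contains r && PySem.Str.isIn r line) = true := by simp [hcr', hir]
        rw [hC]
        by_cases hw : w = r
        · subst hw
          simp [PySem.Dict.get?_insert_self, hcr', hir]
        · simp [PySem.Dict.contains_insert, PySem.Dict.get?_insert_of_ne d j hw, hw]
      · have hir' : PySem.Chars.isIn r.toList line.toList = false := by simpa using hir
        have hC : (!d.contains r && PySem.Str.isIn r line) = false := by simp [hir']
        rw [hC]
        by_cases hw : w = r
        · subst hw; simp [hir']
        · simp [hw]

theorem pvBuildIndex_get? (root : List String) (lines : List String) (s : Int)
    (d : PySem.Dict String Int) (w : String) (hw : w ∈ root) :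
    (pvBuildIndex root lines s d).get? w =
      match d.get? w with
      | some v => some v
      | none => (pvScan w lines).map (fun j => s + (j : Int)) := by
  induction lines generalizing s d with
  | nil =>
    cases hd : d.get? w <;> simp [pvBuildIndex, pvScan, hd]
  | cons line rest ih =>
    show (pvBuildIndex root rest (s + 1) (pvRecord line s root d)).get? w = _
    rw [ih, pvRecord_get?]
    cases hd : d.get? w with
    | some v =>
      have hc : d.contains w = true := by
        rw [PySem.Dict.contains_eq_isSome_get?, hd]; rfl
      simp [hc]
    | none =>
      have hc : d.contains w = false := (PySem.Dict.get?_eq_none_iff_contains d w).mp hd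
      by_cases hin : PySem.Chars.isIn w.toList line.toList = true
      · have hin' : PySem.Str.isIn w line = true := by simpa using hin
        have hfind : -1 < PySem.Chars.find line.toList w.toList := by
          simpa using (pvCondIff line w).mpr hin'
        simp [hw, hc, hin, pvScan, hfind]
      · have hin' : ¬ PySem.Str.isIn w line = true := fun hf => hin (by simpa using hf)
        have hfind : ¬ (-1 < PySem.Chars.find line.toList w.toList) := by
          simp only [not_lt]
          by_contra hf
          exact hin' ((pvCondIff line w).mp (by simpa using not_le.mp hf))
        have hcond : ¬ (w ∈ root ∧ d.contains w = false ∧ PySem.Str.isIn w line = true) := by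
          intro h; exact hin' h.2.2
        rw [if_neg hcond]
        cases hrest : pvScan w rest with
        | none => simp [pvScan, hfind, hrest]
        | some j => simp [pvScan, hfind, hrest]; ring

theorem pvOut_eq (data' : List String) (idx : PySem.Dict String Int) (ws : List String)
    (h : ∀ w ∈ ws, idx.get? w = (pvScan w data').map (fun j => (j : Int))) (acc : List (List String)) :
    pvALoop data' ws acc = acc ++ pvBOut data' idx ws := by
  induction ws generalizing acc with
  | nil => simp [pvALoop, pvBOut]
  | cons w rest ih =>
    have hrest : ∀ w' ∈ rest, idx.get? w' = (pvScan w' data').map (fun j => (j : Int)) :=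
      fun w' hw' => h w' (List.mem_cons_of_mem _ hw')
    have hw := h w List.mem_cons_self
    simp only [pvALoop, pvBOut, hw]
    cases hs : pvScan w data' with
    | none => simp [ih hrest]
    | some j =>
      cases hg : PySem.List.pyGet? data' ((j : Int) + 2) with
      | none => simp [hg, ih hrest]
      | some line => simp [hg, ih hrest]

-- ===== VERDICT (by name: the statement is the Claim_ definition above) =====
theorem parseGrammar_spec : Claim_equal_parseGrammar := by
  intro data _ _
  show parseGrammar data = parseGrammar_alt data
  unfold parseGrammar parseGrammar_alt
  rw [pvFindRootB_eq]
  cases pvScan "root" data with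
  | none => rfl
  | some i =>
    show (match PySem.List.pop? data ((i : Int) + 1) with
        | none => []
        | some (nextLine, popped) => pvALoop popped (PySem.Str.split₀ nextLine) []) =
      (match PySem.List.pop? data ((i : Int) + 1) with
        | none => ([] : List (List String))
        | some (nextLine, popped) =>
          pvBOut popped (pvBuildIndex (PySem.Str.split₀ nextLine) popped 0 PySem.Dict.empty)
            (PySem.Str.split₀ nextLine))
    cases PySem.List.pop? data ((i : Int) + 1) with
    | none => rfl
    | some pr =>
      obtain ⟨nextLine, popped⟩ := pr
      have hidx : ∀ w ∈ PySem.Str.split₀ nextLine,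
          (pvBuildIndex (PySem.Str.split₀ nextLine) popped 0 PySem.Dict.empty).get? w =
            (pvScan w popped).map (fun j => (j : Int)) := by
        intro w hwmem
        rw [pvBuildIndex_get? _ _ _ _ _ hwmem]
        simp only [PySem.Dict.get?_empty]
        cases hs : pvScan w popped <;> simp
      simpa using pvOut_eq popped _ (PySem.Str.split₀ nextLine) hidx []
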